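-- pv_equiv track=rewrite | github.com/Fati349/District-heating | ILS.py | is_valid_tree
-- ===== SOURCE A (Python) =====
-- from collections import defaultdict
--
-- def is_valid_tree(tree_edges: list, data: dict) -> bool:
--     """Check that edges form a valid directed spanning tree rooted at source."""
--     N      = data["N"]
--     source = data["source"]
--
--     if len(tree_edges) != N - 1:
--         return False
--
--     in_degree = defaultdict(int)
--     children  = defaultdict(list)
--     for (a, b) in tree_edges:
--         in_degree[b] += 1
--         children[a].append(b)
--
--     for node in range(N):
--         expected = 0 if node == source else 1
--         if in_degree[node] != expected:
--             return False
--
--     visited = {source}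
--     queue   = [source]
--     while queue:
--         node = queue.pop()
--         for ch in children[node]:
--             if ch not in visited:
--                 visited.add(ch)
--                 queue.append(ch)
--
--     return len(visited) == N
-- ===== SOURCE B (Python) =====
-- from collections import Counter
--
-- def is_valid_tree(tree_edges: list, data: dict) -> bool:
--     """Check that edges form a valid directed spanning tree rooted at source,
--     by ascending parent pointers instead of a BFS over a children map."""
--     N      = data["N"]
--     source = data["source"]
--
--     if len(tree_edges) != N - 1:
--         return False
--
--     indeg  = Counter(b for _, b in tree_edges)
--     parent = {b: a for a, b in tree_edges}
--
--     if any(indeg[node] != (0 if node == source else 1) for node in range(N)):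
--         return False
--
--     for node in range(N):
--         cur = node
--         for _ in range(N):
--             if cur == source:
--                 break
--             if cur not in parent:
--                 return False
--             cur = parent[cur]
--         else:
--             return False
--     return True
-- ===== Notes on version B (the rewrite author's own statement) =====
-- stated objective: alternative
-- what changed: Replaces the children-adjacency map plus stack-based graph traversal with a Counter for in-degrees and a parent map whose chains are ascended (at most N steps per node) to verify every node reaches the source.
import Mathlib
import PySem

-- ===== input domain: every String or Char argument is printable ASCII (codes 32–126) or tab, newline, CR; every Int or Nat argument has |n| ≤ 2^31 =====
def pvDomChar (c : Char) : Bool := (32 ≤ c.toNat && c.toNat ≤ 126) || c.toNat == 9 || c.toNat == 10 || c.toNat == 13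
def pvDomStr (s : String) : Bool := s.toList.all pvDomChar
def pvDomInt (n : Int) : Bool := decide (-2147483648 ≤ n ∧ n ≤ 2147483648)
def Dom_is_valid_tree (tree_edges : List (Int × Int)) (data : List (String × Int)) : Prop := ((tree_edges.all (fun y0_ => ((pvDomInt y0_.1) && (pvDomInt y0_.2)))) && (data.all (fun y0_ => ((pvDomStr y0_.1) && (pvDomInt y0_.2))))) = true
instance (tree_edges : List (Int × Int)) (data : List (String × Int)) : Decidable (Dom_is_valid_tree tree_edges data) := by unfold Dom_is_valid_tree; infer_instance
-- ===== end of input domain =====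

-- B replaces A's children-map BFS by a Counter of in-degrees plus a parent map whose
-- chains are ascended (at most N steps per node); return values agree whenever data has
-- the keys "N" and "source" (Python raises KeyError otherwise).


-- ===== PORT A =====
-- inner body of A's while loop: 'for ch in children[node]: if ch not in visited: …'
def stepF (p : PySem.Set Int × List Int) (ch : Int) : PySem.Set Int × List Int :=
  if p.1.contains ch then p else (PySem.Set.add p.1 ch, ch :: p.2)

-- A's 'while queue' loop; the queue is a stack (append/pop at the same end), kept here
-- top-first.  Fuel tree_edges.length + 1 bounds the number of pops (each push is a
-- fresh visited element, at most one per edge), so the loop always ends on empty queue.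
def bfsA (children : PySem.Dict Int (List Int)) :
    Nat → PySem.Set Int → List Int → PySem.Set Int
  | 0, visited, _ => visited
  | _ + 1, visited, [] => visited
  | fuel + 1, visited, node :: rest =>
      let st := (children.getD node []).foldl stepF (visited, rest)
      bfsA children fuel st.1 st.2

def is_valid_tree (tree_edges : List (Int × Int)) (data : List (String × Int)) : Bool :=
  match (PySem.Dict.mk data).get? "N", (PySem.Dict.mk data).get? "source" with
  | some N, some source =>
      if (tree_edges.length : Int) ≠ N - 1 then false
      else
        let dd := tree_edges.foldl
          (fun (p : PySem.Dict Int Int × PySem.Dict Int (List Int)) e =>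
            (p.1.modify e.2 0 (· + 1), p.2.modify e.1 [] (· ++ [e.2])))
          (PySem.Dict.empty, PySem.Dict.empty)
        if (PySem.List.pyRange 0 N 1).all (fun node =>
             dd.1.getD node 0 == (if node == source then (0 : Int) else 1))
        then
          let visited := bfsA dd.2 (tree_edges.length + 1) [source] [source]
          ((visited.length : Int) == N)
        else false
  | _, _ => false

-- ===== PORT B =====
-- B's inner 'for _ in range(N)' walk up the parent chain (fuel = remaining iterations)
def walkB (parent : PySem.Dict Int Int) (source : Int) : Nat → Int → Bool
  | 0, _ => false
  | fuel + 1, cur =>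
      if cur == source then true
      else
        match parent.get? cur with
        | none => false
        | some p => walkB parent source fuel p

def is_valid_tree_alt (tree_edges : List (Int × Int)) (data : List (String × Int)) : Bool :=
  match (PySem.Dict.mk data).get? "N" with
  | none => false
  | some N =>
    match (PySem.Dict.mk data).get? "source" with
    | none => false
    | some source =>
      if (tree_edges.length : Int) ≠ N - 1 then false
      else
        let indeg := PySem.Dict.counter (tree_edges.map (·.2))
        let parent := tree_edges.foldl
          (fun (d : PySem.Dict Int Int) e => d.insert e.2 e.1) PySem.Dict.empty
        if (PySem.List.pyRange 0 N 1).any (fun node =>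
             indeg.getD node 0 != (if node == source then (0 : Int) else 1))
        then false
        else (PySem.List.pyRange 0 N 1).all (fun node => walkB parent source N.toNat node)

-- ===== PRECONDITION & SPEC =====
-- Pre_ excludes only inputs whose dict lacks the key "N" or "source": there the Python
-- A (and B) raises KeyError and returns nothing.
def Pre_is_valid_tree (tree_edges : List (Int × Int)) (data : List (String × Int)) : Prop :=
  "N" ∈ data.map Prod.fst ∧ "source" ∈ data.map Prod.fst
instance (tree_edges : List (Int × Int)) (data : List (String × Int)) : Decidable (Pre_is_valid_tree tree_edges data) := by unfold Pre_is_valid_tree; infer_instance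

def pvWitness_is_valid_tree : (List (Int × Int)) × (List (String × Int)) :=
  ([(0, 1)], [("N", 2), ("source", 0)])

def Spec_is_valid_tree (tree_edges : List (Int × Int)) (data : List (String × Int)) (out : Bool) : Prop := out = is_valid_tree_alt tree_edges data
instance (tree_edges : List (Int × Int)) (data : List (String × Int)) (out : Bool) : Decidable (Spec_is_valid_tree tree_edges data out) := by unfold Spec_is_valid_tree; infer_instance

-- ===== CLAIM (what is proved, stated in full; the proofs are below) =====
def Claim_equal_is_valid_tree : Prop := ∀ (tree_edges : List (Int × Int)) (data : List (String × Int)), Dom_is_valid_tree tree_edges data → Pre_is_valid_tree tree_edges data → Spec_is_valid_tree tree_edges data (is_valid_tree tree_edges data)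

-- ===== LEMMAS AND PROOFS =====

-- proof-side abbreviations for the two programs' data structures
def headsOf (E : List (Int × Int)) : List Int := E.map (·.2)

def childrenD (E : List (Int × Int)) : PySem.Dict Int (List Int) :=
  E.foldl (fun d e => d.modify e.1 [] (· ++ [e.2])) PySem.Dict.empty

def parentD (E : List (Int × Int)) : PySem.Dict Int Int :=
  E.foldl (fun d e => d.insert e.2 e.1) PySem.Dict.empty

-- v is connected to source by an edge path (downward in A's children graph,
-- upward along B's parent chain)
inductive ReachesE (E : List (Int × Int)) (source : Int) : Int → Prop
  | src : ReachesE E source source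
  | step {a b : Int} : ReachesE E source a → (a, b) ∈ E → ReachesE E source b

-- explicit parent chain from v up to source
def UpChain (E : List (Int × Int)) (source : Int) : Int → List Int → Prop
  | v, [] => v = source
  | v, p :: rest => (p, v) ∈ E ∧ UpChain E source p rest

theorem mem_children (E : List (Int × Int)) (a b : Int) :
    b ∈ (childrenD E).getD a [] ↔ (a, b) ∈ E := by
  unfold childrenD
  rw [PySem.Dict.getD_foldl_modify_append]
  simp only [PySem.Dict.getD_empty, List.nil_append, List.mem_map, List.mem_filter,
    beq_iff_eq]
  constructor
  · rintro ⟨e, ⟨he, h1⟩, h2⟩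
    have : e = (a, b) := Prod.ext h1 h2
    exact this ▸ he
  · intro h
    exact ⟨(a, b), ⟨h, rfl⟩, rfl⟩

theorem foldl_insert_get_not_mem (E : List (Int × Int)) :
    ∀ (d0 : PySem.Dict Int Int) (v : Int), v ∉ headsOf E →
      (E.foldl (fun d e => d.insert e.2 e.1) d0).get? v = d0.get? v := by
  induction E with
  | nil => intro d0 v _; rfl
  | cons e E ih =>
      intro d0 v hv
      simp only [headsOf, List.map_cons, List.mem_cons, not_or] at hv
      simp only [List.foldl_cons]
      rw [ih _ v (by simpa [headsOf] using hv.2)]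
      exact PySem.Dict.get?_insert_of_ne _ _ hv.1

theorem foldl_insert_get_some (E : List (Int × Int)) :
    ∀ (d0 : PySem.Dict Int Int) (v a : Int),
      (E.foldl (fun d e => d.insert e.2 e.1) d0).get? v = some a →
      (a, v) ∈ E ∨ d0.get? v = some a := by
  induction E with
  | nil => intro d0 v a h; exact Or.inr h
  | cons e E ih =>
      intro d0 v a h
      simp only [List.foldl_cons] at h
      rcases ih _ v a h with hm | hd
      · exact Or.inl (List.mem_cons_of_mem _ hm)
      · by_cases hv : v = e.2
        · rw [hv, PySem.Dict.get?_insert_self] at hd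
          obtain rfl : e.1 = a := Option.some.inj hd
          left
          rw [hv, ← Prod.mk.eta (p := e)]
          exact List.mem_cons_self ..
        · rw [PySem.Dict.get?_insert_of_ne _ _ hv] at hd
          exact Or.inr hd

theorem parentD_get_some_mem (E : List (Int × Int)) (v a : Int)
    (h : (parentD E).get? v = some a) : (a, v) ∈ E := by
  rcases foldl_insert_get_some E _ v a h with hm | hd
  · exact hm
  · simp [PySem.Dict.get?_empty] at hd

theorem foldl_insert_get_mem (E : List (Int × Int)) :
    ∀ (d0 : PySem.Dict Int Int) (a v : Int), (headsOf E).Nodup → (a, v) ∈ E →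
      (E.foldl (fun d e => d.insert e.2 e.1) d0).get? v = some a := by
  induction E with
  | nil => intro _ _ _ _ hm; simp at hm
  | cons e E ih =>
      intro d0 a v hnd hm
      simp only [headsOf, List.map_cons, List.nodup_cons] at hnd
      simp only [List.foldl_cons]
      rcases List.mem_cons.1 hm with he | hm'
      · subst he
        rw [foldl_insert_get_not_mem E _ v (by simpa [headsOf] using hnd.1)]
        exact PySem.Dict.get?_insert_self ..
      · exact ih _ a v (by simpa [headsOf] using hnd.2) hm'

theorem parentD_get_of_mem (E : List (Int × Int)) (hnd : (headsOf E).Nodup)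
    {a v : Int} (hm : (a, v) ∈ E) : (parentD E).get? v = some a :=
  foldl_insert_get_mem E _ a v hnd hm

theorem walk_sound (E : List (Int × Int)) (source : Int) :
    ∀ (f : Nat) (v : Int), walkB (parentD E) source f v = true → ReachesE E source v := by
  intro f
  induction f with
  | zero => intro v h; simp [walkB] at h
  | succ f ih =>
      intro v h
      by_cases hs : v = source
      · exact hs ▸ ReachesE.src
      · simp only [walkB, beq_iff_eq, if_neg hs] at h
        cases hg : (parentD E).get? v with
        | none => rw [hg] at h; simp at h
        | some p =>
            rw [hg] at h
            exact ReachesE.step (ih p h) (parentD_get_some_mem E v p hg)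

theorem walk_complete (E : List (Int × Int)) (source : Int) (hnd : (headsOf E).Nodup) :
    ∀ (l : List Int) (v : Int), UpChain E source v l →
      ∀ f : Nat, l.length < f → walkB (parentD E) source f v = true := by
  intro l
  induction l with
  | nil =>
      intro v h f hf
      cases f with
      | zero => simp at hf
      | succ f => simp [walkB, UpChain] at h ⊢; simp [h]
  | cons p rest ih =>
      intro v h f hf
      obtain ⟨hpv, hrest⟩ := h
      cases f with
      | zero => simp at hf
      | succ f =>
          simp only [walkB]
          by_cases hs : v = source
          · simp [hs]
          · simp only [beq_iff_eq, if_neg hs]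
            rw [parentD_get_of_mem E hnd hpv]
            exact ih p hrest f (by simpa using hf)

theorem reaches_iff_chain (E : List (Int × Int)) (source v : Int) :
    ReachesE E source v ↔ ∃ l, UpChain E source v l := by
  constructor
  · intro h
    induction h with
    | src => exact ⟨[], rfl⟩
    | step _ hab ih =>
        obtain ⟨l, hl⟩ := ih
        exact ⟨_ :: l, hab, hl⟩
  · rintro ⟨l, h⟩
    induction l generalizing v with
    | nil => exact h ▸ ReachesE.src
    | cons p rest ih => exact ReachesE.step (ih p h.2) h.1

theorem chain_heads (E : List (Int × Int)) (source : Int) :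
    ∀ (l : List Int) (v : Int), UpChain E source v l →
      ∀ x ∈ (v :: l).dropLast, x ∈ headsOf E := by
  intro l
  induction l with
  | nil => intro v _ x hx; simp at hx
  | cons p rest ih =>
      intro v h x hx
      rw [List.dropLast_cons₂] at hx
      rcases List.mem_cons.1 hx with hv | hx'
      · subst hv
        exact List.mem_map.2 ⟨(p, x), h.1, rfl⟩
      · exact ih p h.2 x hx'

theorem upchain_suffix (E : List (Int × Int)) (source : Int) :
    ∀ (l : List Int) (v : Int), UpChain E source v l →
      ∀ x ∈ v :: l, ∃ t, UpChain E source x t ∧ (x :: t) <:+ (v :: l) := by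
  intro l
  induction l with
  | nil =>
      intro v h x hx
      simp only [List.mem_singleton] at hx
      exact ⟨[], hx ▸ h, hx ▸ List.suffix_refl _⟩
  | cons p rest ih =>
      intro v h x hx
      rcases List.mem_cons.1 hx with hv | hx'
      · exact ⟨p :: rest, hv ▸ h, hv ▸ List.suffix_refl _⟩
      · obtain ⟨t, ht, hsuf⟩ := ih p h.2 x hx'
        exact ⟨t, ht, hsuf.trans (List.suffix_cons v (p :: rest))⟩

theorem upchain_nodup (E : List (Int × Int)) (source : Int) :
    ∀ (l : List Int) (v : Int), UpChain E source v l →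
      ∃ t, UpChain E source v t ∧ (v :: t).Nodup ∧ t.length ≤ l.length := by
  intro l
  induction l with
  | nil => intro v h; exact ⟨[], h, List.nodup_singleton v, le_refl _⟩
  | cons p rest ih =>
      intro v h
      obtain ⟨t, ht, hnd, hlen⟩ := ih p h.2
      by_cases hv : v ∈ p :: t
      · obtain ⟨t', ht', hsuf⟩ := upchain_suffix E source t p ht v hv
        refine ⟨t', ht', hsuf.sublist.nodup hnd, ?_⟩
        have := hsuf.sublist.length_le
        simp only [List.length_cons] at this ⊢
        omega
      · exact ⟨p :: t, ⟨h.1, ht⟩, List.nodup_cons.2 ⟨hv, hnd⟩,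
          by simpa using Nat.succ_le_succ hlen⟩

theorem stepFold (cs : List Int) : ∀ (v : PySem.Set Int) (q : List Int),
    (∀ x, x ∈ (cs.foldl stepF (v, q)).1 ↔ x ∈ v ∨ x ∈ cs) ∧
    (∀ x ∈ (cs.foldl stepF (v, q)).2, x ∈ q ∨ x ∈ cs) ∧
    (∀ x ∈ q, x ∈ (cs.foldl stepF (v, q)).2) ∧
    (∀ x ∈ (cs.foldl stepF (v, q)).1, x ∈ v ∨ x ∈ (cs.foldl stepF (v, q)).2) ∧
    (v.Nodup → (cs.foldl stepF (v, q)).1.Nodup) ∧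
    (cs.foldl stepF (v, q)).1.length + q.length = v.length + (cs.foldl stepF (v, q)).2.length := by
  induction cs with
  | nil =>
      intro v q
      refine ⟨fun x => by simp, fun x hx => Or.inl hx, fun x hx => hx,
        fun x hx => Or.inl hx, fun h => h, rfl⟩
  | cons ch cs ih =>
      intro v q
      by_cases hc : ch ∈ v
      · have hstep : stepF (v, q) ch = (v, q) := by
          simp [stepF, hc]
        simp only [List.foldl_cons, hstep]
        obtain ⟨m1, m2, m3, m4, m5, m6⟩ := ih v q
        refine ⟨fun x => ?_, fun x hx => ?_, m3, m4, m5, m6⟩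
        · rw [m1 x]
          constructor
          · rintro (h | h)
            · exact Or.inl h
            · exact Or.inr (List.mem_cons_of_mem _ h)
          · rintro (h | h)
            · exact Or.inl h
            · rcases List.mem_cons.1 h with rfl | h'
              · exact Or.inl hc
              · exact Or.inr h'
        · rcases m2 x hx with h | h
          · exact Or.inl h
          · exact Or.inr (List.mem_cons_of_mem _ h)
      · have hstep : stepF (v, q) ch = (PySem.Set.add v ch, ch :: q) := by
          simp [stepF, hc]
        simp only [List.foldl_cons, hstep]
        obtain ⟨m1, m2, m3, m4, m5, m6⟩ := ih (PySem.Set.add v ch) (ch :: q)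
        refine ⟨fun x => ?_, fun x hx => ?_, fun x hx => m3 x (List.mem_cons_of_mem _ hx),
          fun x hx => ?_, fun h => m5 (PySem.Set.nodup_add _ _ h), ?_⟩
        · rw [m1 x, PySem.Set.mem_add]
          constructor
          · rintro ((h | rfl) | h)
            · exact Or.inl h
            · exact Or.inr (List.mem_cons_self ..)
            · exact Or.inr (List.mem_cons_of_mem _ h)
          · rintro (h | h)
            · exact Or.inl (Or.inl h)
            · rcases List.mem_cons.1 h with rfl | h'
              · exact Or.inl (Or.inr rfl)
              · exact Or.inr h'
        · rcases m2 x hx with h | h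
          · rcases List.mem_cons.1 h with rfl | h'
            · exact Or.inr (List.mem_cons_self ..)
            · exact Or.inl h'
          · exact Or.inr (List.mem_cons_of_mem _ h)
        · rcases m4 x hx with h | h
          · rcases (PySem.Set.mem_add _ _ _).1 h with h' | rfl
            · exact Or.inl h'
            · exact Or.inr (m3 _ (List.mem_cons_self ..))
          · exact Or.inr h
        · have hlen : (PySem.Set.add v ch).length = v.length + 1 := by
            rw [PySem.Set.add_of_not_mem hc]; simp
          simp only [List.length_cons] at m6
          omega

theorem bfs_go (E : List (Int × Int)) (source : Int) :
    ∀ (fuel : Nat) (visited : PySem.Set Int) (queue : List Int),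
      (∀ x ∈ queue, x ∈ visited) →
      visited.Nodup →
      (∀ x ∈ visited, x = source ∨ x ∈ headsOf E) →
      (∀ x ∈ visited, ReachesE E source x) →
      (∀ x ∈ visited, x ∈ queue ∨ ∀ b, (x, b) ∈ E → b ∈ visited) →
      (queue.length + (headsOf E).length + 1 ≤ fuel + visited.length) →
      (∀ x ∈ visited, x ∈ bfsA (childrenD E) fuel visited queue) ∧
      (bfsA (childrenD E) fuel visited queue).Nodup ∧
      (∀ x ∈ bfsA (childrenD E) fuel visited queue, ReachesE E source x) ∧
      (∀ x ∈ bfsA (childrenD E) fuel visited queue, ∀ b, (x, b) ∈ E →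
        b ∈ bfsA (childrenD E) fuel visited queue) := by
  intro fuel
  induction fuel with
  | zero =>
      intro visited queue h1 h2 h3 h4 h5 hfuel
      have hsub : visited ⊆ source :: headsOf E := by
        intro x hx
        rcases h3 x hx with rfl | hh
        · exact List.mem_cons_self ..
        · exact List.mem_cons_of_mem _ hh
      have hle : visited.length ≤ (headsOf E).length + 1 :=
        by simpa using (List.subperm_of_subset h2 hsub).length_le
      have hq : queue = [] := List.eq_nil_of_length_eq_zero (by omega)
      subst hq
      simp only [bfsA]
      refine ⟨fun x hx => hx, h2, h4, fun x hx b hb => ?_⟩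
      rcases h5 x hx with hq | hcl
      · simp at hq
      · exact hcl b hb
  | succ fuel ih =>
      intro visited queue h1 h2 h3 h4 h5 hfuel
      cases queue with
      | nil =>
          simp only [bfsA]
          refine ⟨fun x hx => hx, h2, h4, fun x hx b hb => ?_⟩
          rcases h5 x hx with hq | hcl
          · simp at hq
          · exact hcl b hb
      | cons node rest =>
          simp only [bfsA]
          obtain ⟨m1, m2, m3, m4, m5, m6⟩ := stepFold ((childrenD E).getD node []) visited rest
          have hnodevis : node ∈ visited := h1 node (List.mem_cons_self ..)
          have hcs_sub : ∀ x ∈ (childrenD E).getD node [],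
              x ∈ (((childrenD E).getD node []).foldl stepF (visited, rest)).1 :=
            fun x hx => (m1 x).2 (Or.inr hx)
          have hvis_sub : ∀ x ∈ visited,
              x ∈ (((childrenD E).getD node []).foldl stepF (visited, rest)).1 :=
            fun x hx => (m1 x).2 (Or.inl hx)
          obtain ⟨c1, c2, c3, c4⟩ := ih
            (((childrenD E).getD node []).foldl stepF (visited, rest)).1
            (((childrenD E).getD node []).foldl stepF (visited, rest)).2
            (fun x hx => by
              rcases m2 x hx with hr | hc
              · exact hvis_sub x (h1 x (List.mem_cons_of_mem _ hr))
              · exact hcs_sub x hc)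
            (m5 h2)
            (fun x hx => by
              rcases (m1 x).1 hx with hv | hc
              · exact h3 x hv
              · exact Or.inr (List.mem_map.2 ⟨(node, x), (mem_children E node x).1 hc, rfl⟩))
            (fun x hx => by
              rcases (m1 x).1 hx with hv | hc
              · exact h4 x hv
              · exact ReachesE.step (h4 node hnodevis) ((mem_children E node x).1 hc))
            (fun x hx => by
              rcases m4 x hx with hv | hq
              · rcases h5 x hv with hxq | hcl
                · rcases List.mem_cons.1 hxq with rfl | hr
                  · exact Or.inr fun b hb =>
                      hcs_sub b ((mem_children E x b).2 hb)
                  · exact Or.inl (m3 x hr)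
                · exact Or.inr fun b hb => hvis_sub b (hcl b hb)
              · exact Or.inl hq)
            (by simp only [List.length_cons] at hfuel; omega)
          exact ⟨fun x hx => c1 x (hvis_sub x hx), c2, c3, c4⟩

theorem reaches_shape (E : List (Int × Int)) (source v : Int)
    (h : ReachesE E source v) : v = source ∨ v ∈ headsOf E := by
  cases h with
  | src => exact Or.inl rfl
  | step _ hab => exact Or.inr (List.mem_map.2 ⟨_, hab, rfl⟩)

theorem main_regime (E : List (Int × Int)) (N source : Int)
    (hlen : (E.length : Int) = N - 1)
    (hdeg : ∀ v ∈ PySem.List.pyRange 0 N 1,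
      (headsOf E).count v = if v = source then 0 else 1) :
    (((bfsA (childrenD E) (E.length + 1) [source] [source]).length : Int) == N)
      = (PySem.List.pyRange 0 N 1).all (fun v => walkB (parentD E) source N.toNat v) := by
  have h0 : (0 : Int) ≤ (E.length : Int) := Int.natCast_nonneg _
  have hN : 1 ≤ N := by omega
  have hHlen : (headsOf E).length = E.length := List.length_map ..
  have hRangeLen : (PySem.List.pyRange 0 N 1).length = N.toNat := by
    rw [PySem.List.length_pyRange_one]; omega
  -- source lies in range(N)
  have hsrc : source ∈ PySem.List.pyRange 0 N 1 := by
    by_contra hns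
    have hsp : List.Subperm (PySem.List.pyRange 0 N 1) (headsOf E) := by
      rw [List.subperm_ext_iff]
      intro x hx
      have hxs : x ≠ source := fun h => hns (h ▸ hx)
      rw [List.count_eq_one_of_mem (PySem.List.nodup_pyRange_one ..) hx,
        hdeg x hx, if_neg hxs]
    have := hsp.length_le
    rw [hRangeLen, hHlen] at this
    omega
  -- the heads are a permutation of range(N) minus the source
  have hRnd : ((PySem.List.pyRange 0 N 1).erase source).Nodup :=
    (PySem.List.nodup_pyRange_one ..).erase source
  have hRlen : ((PySem.List.pyRange 0 N 1).erase source).length = N.toNat - 1 := by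
    rw [List.length_erase_of_mem hsrc, hRangeLen]
  have hRsub : List.Subperm ((PySem.List.pyRange 0 N 1).erase source) (headsOf E) := by
    rw [List.subperm_ext_iff]
    intro x hx
    obtain ⟨hxs, hxr⟩ := (PySem.List.nodup_pyRange_one ..).mem_erase_iff.1 hx
    rw [List.count_eq_one_of_mem hRnd hx, hdeg x hxr, if_neg hxs]
  have hperm : ((PySem.List.pyRange 0 N 1).erase source).Perm (headsOf E) :=
    hRsub.perm_of_length_le (by rw [hHlen, hRlen]; omega)
  have hHnd : (headsOf E).Nodup := hperm.nodup hRnd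
  have hHmem : ∀ x, x ∈ headsOf E ↔ x ∈ PySem.List.pyRange 0 N 1 ∧ x ≠ source := by
    intro x
    rw [← hperm.mem_iff, (PySem.List.nodup_pyRange_one ..).mem_erase_iff]
    tauto
  -- run A's traversal
  obtain ⟨c1, c2, c3, c4⟩ := bfs_go E source (E.length + 1) [source] [source]
    (fun x hx => hx) (List.nodup_singleton _)
    (fun x hx => Or.inl (List.mem_singleton.1 hx))
    (fun x hx => (List.mem_singleton.1 hx) ▸ ReachesE.src)
    (fun x hx => Or.inl hx)
    (by simp only [List.length_singleton, hHlen]; omega)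
  have hsrcV : source ∈ bfsA (childrenD E) (E.length + 1) [source] [source] :=
    c1 source (List.mem_singleton.2 rfl)
  have hVreach : ∀ x, x ∈ bfsA (childrenD E) (E.length + 1) [source] [source] ↔
      ReachesE E source x := by
    intro x
    refine ⟨c3 x, fun h => ?_⟩
    induction h with
    | src => exact hsrcV
    | step ha hab ih => exact c4 _ ih _ hab
  have hVsub : ∀ x ∈ bfsA (childrenD E) (E.length + 1) [source] [source],
      x ∈ PySem.List.pyRange 0 N 1 := by
    intro x hx
    rcases reaches_shape E source x ((hVreach x).1 hx) with rfl | hh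
    · exact hsrc
    · exact ((hHmem x).1 hh).1
  -- B's walk decides reachability
  have hwalk : ∀ v, walkB (parentD E) source N.toNat v = true ↔ ReachesE E source v := by
    intro v
    refine ⟨walk_sound E source _ v, fun h => ?_⟩
    obtain ⟨l, hl⟩ := (reaches_iff_chain E source v).1 h
    obtain ⟨t, ht, htnd, _⟩ := upchain_nodup E source l v hl
    have hdl : ∀ x ∈ (v :: t).dropLast, x ∈ headsOf E := chain_heads E source t v ht
    have hdnd : (v :: t).dropLast.Nodup := htnd.sublist (List.dropLast_sublist (v :: t))
    have hdlen : (v :: t).dropLast.length ≤ (headsOf E).length :=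
      (List.subperm_of_subset hdnd hdl).length_le
    have htlen : t.length < N.toNat := by
      have : (v :: t).dropLast.length = t.length := by simp
      omega
    exact walk_complete E source hHnd t v ht N.toNat htlen
  -- both sides say: every node of range(N) is connected to source
  rw [Bool.eq_iff_iff, beq_iff_eq, List.all_eq_true]
  have hVnodup := c2
  constructor
  · intro hlenEq v hv
    have hVperm : (bfsA (childrenD E) (E.length + 1) [source] [source]).Perm
        (PySem.List.pyRange 0 N 1) :=
      (List.subperm_of_subset c2 hVsub).perm_of_length_le (by rw [hRangeLen]; omega)
    exact (hwalk v).2 ((hVreach v).1 (hVperm.mem_iff.2 hv))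
  · intro hall
    have hsub2 : PySem.List.pyRange 0 N 1 ⊆
        bfsA (childrenD E) (E.length + 1) [source] [source] := by
      intro v hv
      exact (hVreach v).2 (walk_sound E source _ v (hall v hv))
    have hge := (List.subperm_of_subset (PySem.List.nodup_pyRange_one ..) hsub2).length_le
    have hle := (List.subperm_of_subset c2 hVsub).length_le
    rw [hRangeLen] at hge hle
    omega

-- ===== VERDICT (by name: the statement is the Claim_ definition above) =====
theorem is_valid_tree_spec : Claim_equal_is_valid_tree := by
  intro E data _ hpre
  unfold Spec_is_valid_tree
  obtain ⟨hkN, hkS⟩ := hpre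
  cases hgn : (PySem.Dict.mk data).get? "N" with
  | none =>
      exfalso
      rw [PySem.Dict.get?_eq_none_iff_not_mem_keys] at hgn
      exact hgn (by simpa [PySem.Dict.keys] using hkN)
  | some n =>
  cases hgs : (PySem.Dict.mk data).get? "source" with
  | none =>
      exfalso
      rw [PySem.Dict.get?_eq_none_iff_not_mem_keys] at hgs
      exact hgs (by simpa [PySem.Dict.keys] using hkS)
  | some s =>
  simp only [is_valid_tree, is_valid_tree_alt, hgn, hgs]
  rw [PySem.List.foldl_prod_mk
    (f := fun (d : PySem.Dict Int Int) (e : Int × Int) => d.modify e.2 0 (· + 1))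
    (g := fun (d : PySem.Dict Int (List Int)) (e : Int × Int) => d.modify e.1 [] (· ++ [e.2]))]
  by_cases hlen : (E.length : Int) ≠ n - 1
  · simp [hlen]
  · simp only [if_neg hlen]
    push Not at hlen
    -- the two degree tests agree pointwise
    have hpt : ∀ node : Int,
        (E.foldl (fun (d : PySem.Dict Int Int) e => d.modify e.2 0 (· + 1))
          PySem.Dict.empty).getD node 0
          = (PySem.Dict.counter (E.map (·.2))).getD node 0 := by
      intro node
      have hfold : (E.map (fun e : Int × Int => e.2)).foldl
            (fun (d : PySem.Dict Int Int) x => d.modify x 0 (· + 1)) PySem.Dict.empty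
          = E.foldl (fun (d : PySem.Dict Int Int) e => d.modify e.2 0 (· + 1))
            PySem.Dict.empty := List.foldl_map
      rw [PySem.Dict.getD_counter, ← hfold, PySem.Dict.getD_foldl_modify_add_one]
      simp
    have hany : ((PySem.List.pyRange 0 n 1).any fun node =>
          (PySem.Dict.counter (E.map (·.2))).getD node 0
            != (if node == s then (0 : Int) else 1))
        = !((PySem.List.pyRange 0 n 1).all fun node =>
          (E.foldl (fun (d : PySem.Dict Int Int) e => d.modify e.2 0 (· + 1))
            PySem.Dict.empty).getD node 0 == (if node == s then (0 : Int) else 1)) := by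
      rw [List.all_eq_not_any_not, Bool.not_not]
      congr 1
      funext node
      rw [hpt node]
      simp [bne]
    rw [hany]
    cases hall : ((PySem.List.pyRange 0 n 1).all fun node =>
        (E.foldl (fun (d : PySem.Dict Int Int) e => d.modify e.2 0 (· + 1))
          PySem.Dict.empty).getD node 0 == (if node == s then (0 : Int) else 1)) with
    | false => simp
    | true =>
        simp only [Bool.not_true, Bool.false_eq_true, if_false, if_true]
        have hdeg : ∀ v ∈ PySem.List.pyRange 0 n 1,
            (headsOf E).count v = if v = s then 0 else 1 := by
          intro v hv
          have := (List.all_eq_true.1 hall) v hv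
          rw [hpt v, PySem.Dict.getD_counter, beq_iff_eq] at this
          by_cases hvs : v = s
          · simp only [hvs, beq_self_eq_true, if_true] at this ⊢
            exact_mod_cast this
          · rw [if_neg hvs]
            rw [show (v == s) = false by simpa using hvs, if_neg (by simp)] at this
            exact_mod_cast this
        have := main_regime E n s hlen hdeg
        simpa [childrenD, parentD] using this
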